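-- pv_equiv track=rewrite | github.com/v-ek/advofcode | day3.py | get_visited_houses
-- ===== SOURCE A (Python) =====
-- def get_visited_houses(path_string):
--     cord = [0,0]
--
--     cord_set = {tuple(cord)}
--     num_chars = len(path_string)
--     for ii in range(0,num_chars):
--
--         if path_string[ii] == '>':
--             cord[0] += 1
--
--         elif path_string[ii] == '<':
--             cord[0] -= 1
--
--         elif path_string[ii] == '^':
--             cord[1] += 1
--
--         elif path_string[ii] == 'v':
--             cord[1] -= 1
--
--         cord_tuple = tuple(cord)
--         cord_set.add(cord_tuple)
--
--     return cord_set
-- ===== SOURCE B (Python) =====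
-- def get_visited_houses(path_string):
--     # Divide and conquer: each segment yields (net displacement, set of positions
--     # visited within the segment, relative to the segment's start, origin included);
--     # the right half's set is translated by the left half's net displacement.
--     DELTA = {'>': (1, 0), '<': (-1, 0), '^': (0, 1), 'v': (0, -1)}
--
--     def go(seg):
--         if len(seg) <= 1:
--             d = DELTA.get(seg, (0, 0))
--             return d, {(0, 0), d}
--         mid = len(seg) // 2
--         (ax, ay), left = go(seg[:mid])
--         (bx, by), right = go(seg[mid:])
--         return (ax + bx, ay + by), left | {(ax + x, ay + y) for (x, y) in right}
--
--     return go(path_string)[1]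
-- ===== Notes on version B (the rewrite author's own statement) =====
-- stated objective: alternative
-- what changed: B replaces A's single forward scan mutating one coordinate and inserting into a set each step by a divide-and-conquer recursion: each half yields (net displacement, relative visited set) and the right half's set is translated by the left half's net displacement before the union.
import Mathlib
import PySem

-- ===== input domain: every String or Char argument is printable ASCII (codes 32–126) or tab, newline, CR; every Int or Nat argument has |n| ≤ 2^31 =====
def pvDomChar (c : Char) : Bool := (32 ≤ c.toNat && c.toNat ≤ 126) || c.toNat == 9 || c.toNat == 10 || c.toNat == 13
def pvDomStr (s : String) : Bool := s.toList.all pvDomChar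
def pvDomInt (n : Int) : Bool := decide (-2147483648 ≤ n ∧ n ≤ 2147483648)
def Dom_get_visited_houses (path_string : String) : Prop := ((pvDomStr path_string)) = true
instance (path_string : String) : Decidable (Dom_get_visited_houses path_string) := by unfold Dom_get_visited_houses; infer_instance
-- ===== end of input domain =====

-- B computes the visited set by divide and conquer (per-segment net displacement + translated
-- union of the halves' relative visited sets) instead of A's forward scan (alternative; return value only).

-- ===== PORT A =====
def get_visited_houses (path_string : String) : List (Int × Int) :=
  let cs := path_string.toList
  let num_chars : Int := PySem.Str.len path_string
  let r := (PySem.List.pyRange 0 num_chars 1).foldl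
    (fun (st : (Int × Int) × PySem.Set (Int × Int)) ii =>
      let ch := PySem.List.pyGetD cs ii ' '
      let cord :=
        if ch = '>' then (st.1.1 + 1, st.1.2)
        else if ch = '<' then (st.1.1 - 1, st.1.2)
        else if ch = '^' then (st.1.1, st.1.2 + 1)
        else if ch = 'v' then (st.1.1, st.1.2 - 1)
        else st.1
      (cord, PySem.Set.add st.2 cord))
    (((0 : Int), (0 : Int)), PySem.Set.ofList [((0 : Int), (0 : Int))])
  r.2

-- ===== PORT B =====
-- DELTA.get(seg, (0,0)) on a segment of length ≤ 1 (keys are the four 1-char strings)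
def pvDelta (seg : List Char) : Int × Int :=
  match seg with
  | [c] =>
      if c = '>' then (1, 0) else if c = '<' then (-1, 0)
      else if c = '^' then (0, 1) else if c = 'v' then (0, -1) else (0, 0)
  | _ => (0, 0)

-- go(seg): (net displacement, visited set relative to seg's start).
-- seg[:mid] / seg[mid:] with mid = len(seg)//2 are exactly List.take mid / List.drop mid
-- (PySem.List.slice_to_natCast / slice_from_natCast); the set comprehension over `right`
-- is ported as Set.ofList of the mapped element list (the translation is injective, so the
-- resulting set does not depend on Python's hash order).
def pvGo (seg : List Char) : (Int × Int) × PySem.Set (Int × Int) :=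
  if h : seg.length ≤ 1 then
    let d := pvDelta seg
    (d, PySem.Set.ofList [((0 : Int), (0 : Int)), d])
  else
    let mid := seg.length / 2
    let l := pvGo (seg.take mid)
    let r := pvGo (seg.drop mid)
    ((l.1.1 + r.1.1, l.1.2 + r.1.2),
     PySem.Set.union l.2 (r.2.map (fun p => (l.1.1 + p.1, l.1.2 + p.2))))
termination_by seg.length
decreasing_by
  · simp only [List.length_take]; omega
  · simp only [List.length_drop]; omega

def get_visited_houses_alt (path_string : String) : List (Int × Int) :=
  (pvGo path_string.toList).2

-- ===== PRECONDITION & SPEC =====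
def Spec_get_visited_houses (path_string : String) (out : List (Int × Int)) : Prop := out = get_visited_houses_alt path_string
instance (path_string : String) (out : List (Int × Int)) : Decidable (Spec_get_visited_houses path_string out) := by unfold Spec_get_visited_houses; infer_instance

-- ===== CLAIM (what is proved, stated in full; the proofs are below) =====
def Claim_equal_get_visited_houses : Prop := ∀ (path_string : String), Dom_get_visited_houses path_string → Spec_get_visited_houses path_string (get_visited_houses path_string)

-- ===== LEMMAS AND PROOFS =====

-- A's step function on the coordinate
def pvStep (c : Int × Int) (ch : Char) : Int × Int :=
  if ch = '>' then (c.1 + 1, c.2)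
  else if ch = '<' then (c.1 - 1, c.2)
  else if ch = '^' then (c.1, c.2 + 1)
  else if ch = 'v' then (c.1, c.2 - 1)
  else c

-- the sequence of positions visited after each character, starting from c
def pvVisits (c : Int × Int) : List Char → List (Int × Int)
  | [] => []
  | ch :: rest => let c' := pvStep c ch; c' :: pvVisits c' rest

-- final position after the whole segment, starting from c
def pvEnd (c : Int × Int) (cs : List Char) : Int × Int := cs.foldl pvStep c

lemma pvA_loop (cs : List Char) (c : Int × Int) (s : PySem.Set (Int × Int)) :
    (cs.foldl
      (fun (st : (Int × Int) × PySem.Set (Int × Int)) ch =>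
        let cord :=
          if ch = '>' then (st.1.1 + 1, st.1.2)
          else if ch = '<' then (st.1.1 - 1, st.1.2)
          else if ch = '^' then (st.1.1, st.1.2 + 1)
          else if ch = 'v' then (st.1.1, st.1.2 - 1)
          else st.1
        (cord, PySem.Set.add st.2 cord))
      (c, s)).2 = (pvVisits c cs).foldl PySem.Set.add s := by
  induction cs generalizing c s with
  | nil => rfl
  | cons ch rest ih =>
      simp only [List.foldl_cons, pvVisits]
      exact ih _ _

lemma pvStep_shift (d p : Int × Int) (ch : Char) :
    pvStep (d.1 + p.1, d.2 + p.2) ch = (d.1 + (pvStep p ch).1, d.2 + (pvStep p ch).2) := by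
  unfold pvStep; split_ifs <;> simp <;> ring

lemma pvVisits_shift (d p : Int × Int) (cs : List Char) :
    pvVisits (d.1 + p.1, d.2 + p.2) cs
      = (pvVisits p cs).map (fun q => (d.1 + q.1, d.2 + q.2)) := by
  induction cs generalizing p with
  | nil => rfl
  | cons ch rest ih =>
      simp only [pvVisits, pvStep_shift, List.map_cons]
      exact congrArg _ (ih _)

lemma pvEnd_shift (d p : Int × Int) (cs : List Char) :
    pvEnd (d.1 + p.1, d.2 + p.2) cs = (d.1 + (pvEnd p cs).1, d.2 + (pvEnd p cs).2) := by
  induction cs generalizing p with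
  | nil => rfl
  | cons ch rest ih =>
      simp only [pvEnd, List.foldl_cons, pvStep_shift] at *
      exact ih _

lemma pvEnd_mem (c : Int × Int) (cs : List Char) : pvEnd c cs ∈ c :: pvVisits c cs := by
  induction cs generalizing c with
  | nil => simp [pvEnd, pvVisits]
  | cons ch rest ih =>
      simp only [pvEnd, List.foldl_cons, pvVisits]
      exact List.mem_cons_of_mem _ (ih _)

lemma pvVisits_append (c : Int × Int) (l r : List Char) :
    pvVisits c (l ++ r) = pvVisits c l ++ pvVisits (pvEnd c l) r := by
  induction l generalizing c with
  | nil => rfl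
  | cons ch rest ih =>
      simp only [List.cons_append, pvVisits, pvEnd, List.foldl_cons]
      exact congrArg _ (ih _)

lemma pvEnd_append (c : Int × Int) (l r : List Char) :
    pvEnd c (l ++ r) = pvEnd (pvEnd c l) r := by
  simp [pvEnd]

lemma pvDelta_singleton (ch : Char) : pvStep (0, 0) ch = pvDelta [ch] := by
  unfold pvStep pvDelta
  split_ifs <;> simp_all

-- set(xs) built from a deduplicated list is the same as from the raw list
lemma pv_update_ofList {α : Type} [BEq α] [LawfulBEq α] (s : PySem.Set α) (z : List α) :
    PySem.Set.update s (PySem.Set.ofList z) = PySem.Set.update s z := by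
  rw [PySem.Set.update_eq_append_filter, PySem.Set.update_eq_append_filter,
      PySem.Set.ofList_ofList]

lemma pv_ofList_map_inj {α β : Type} [BEq α] [LawfulBEq α] [BEq β] [LawfulBEq β]
    (f : α → β) (hf : Function.Injective f) (z : List α) :
    PySem.Set.ofList (z.map f) = (PySem.Set.ofList z).map f := by
  induction z with
  | nil => rfl
  | cons x z ih =>
      simp only [List.map_cons, PySem.Set.ofList_cons, ih]
      refine congrArg _ ?_
      unfold PySem.Set.discard
      rw [List.filter_map]
      refine congrArg _ (List.filter_congr ?_)
      intro a _
      simp [hf.eq_iff]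

-- the divide-and-conquer recursion computes the end position and the ordered visited set
lemma pvGo_spec (seg : List Char) :
    pvGo seg = (pvEnd (0, 0) seg, PySem.Set.ofList ((0, 0) :: pvVisits (0, 0) seg)) := by
  induction seg using pvGo.induct with
  | case1 seg h =>
      rw [pvGo]
      simp only [dif_pos h]
      match seg, h with
      | [], _ => rfl
      | [c], _ =>
          refine Prod.ext ?_ ?_
          · show pvDelta [c] = pvEnd (0,0) [c]
            rw [← pvDelta_singleton]; rfl
          · show PySem.Set.ofList [((0:Int),(0:Int)), pvDelta [c]]
                = PySem.Set.ofList [((0:Int),(0:Int)), pvStep (0,0) c]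
            rw [pvDelta_singleton]
  | case2 seg h x1 ihl ihr =>
      rw [pvGo]
      simp only [dif_neg h]
      show ((((pvGo (seg.take (seg.length / 2))).1.1 + (pvGo (seg.drop (seg.length / 2))).1.1,
              (pvGo (seg.take (seg.length / 2))).1.2 + (pvGo (seg.drop (seg.length / 2))).1.2),
            PySem.Set.union (pvGo (seg.take (seg.length / 2))).2
              ((pvGo (seg.drop (seg.length / 2))).2.map
                (fun p => ((pvGo (seg.take (seg.length / 2))).1.1 + p.1, (pvGo (seg.take (seg.length / 2))).1.2 + p.2))))
          : (Int × Int) × PySem.Set (Int × Int)) = _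
      rw [ihl, ihr]
      have hsplit : seg.take (seg.length / 2) ++ seg.drop (seg.length / 2) = seg := List.take_append_drop (seg.length / 2) seg
      set n := pvEnd (0, 0) (seg.take (seg.length / 2)) with hn
      refine Prod.ext ?_ ?_
      · show (n.1 + (pvEnd (0,0) (seg.drop (seg.length / 2))).1, n.2 + (pvEnd (0,0) (seg.drop (seg.length / 2))).2)
            = pvEnd (0,0) seg
        conv_rhs => rw [← hsplit]
        rw [pvEnd_append, ← hn]
        have := pvEnd_shift n (0,0) (seg.drop (seg.length / 2))
        simpa using this.symm
      · show PySem.Set.union (PySem.Set.ofList ((0,0) :: pvVisits (0,0) (seg.take (seg.length / 2))))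
              ((PySem.Set.ofList ((0,0) :: pvVisits (0,0) (seg.drop (seg.length / 2)))).map
                (fun p => (n.1 + p.1, n.2 + p.2)))
            = PySem.Set.ofList ((0,0) :: pvVisits (0,0) seg)
        conv_rhs => rw [← hsplit]
        have hvis : pvVisits (0,0) (seg.take (seg.length / 2) ++ seg.drop (seg.length / 2))
            = pvVisits (0,0) (seg.take (seg.length / 2))
              ++ (pvVisits (0,0) (seg.drop (seg.length / 2))).map (fun q => (n.1 + q.1, n.2 + q.2)) := by
          rw [pvVisits_append, ← hn]
          have := pvVisits_shift n (0,0) (seg.drop (seg.length / 2))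
          simp only [add_zero] at this
          simp only [Prod.mk.eta] at this
          rw [this]
        rw [hvis]
        have hf : Function.Injective (fun p : Int × Int => (n.1 + p.1, n.2 + p.2)) := by
          intro a b hab
          simp only [Prod.mk.injEq] at hab
          exact Prod.ext (by omega) (by omega)
        rw [← pv_ofList_map_inj _ hf]
        show PySem.Set.update _ _ = _
        rw [pv_update_ofList, List.map_cons, PySem.Set.update_cons]
        simp only [add_zero, Prod.mk.eta]
        have hmem : n ∈ PySem.Set.ofList (((0,0) : Int × Int) :: pvVisits (0,0) (seg.take (seg.length / 2))) := by
          rw [PySem.Set.mem_ofList]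
          exact hn ▸ pvEnd_mem (0,0) (seg.take (seg.length / 2))
        rw [PySem.Set.add_of_mem hmem]
        rw [← List.cons_append, PySem.Set.ofList_append]

theorem pv_main (path_string : String) :
    get_visited_houses path_string = get_visited_houses_alt path_string := by
  unfold get_visited_houses get_visited_houses_alt
  dsimp only
  rw [PySem.Str.len_eq,
      PySem.List.foldl_pyRange_zero_pyGetD' path_string.toList ' '
        (fun (st : (Int × Int) × PySem.Set (Int × Int)) ch =>
          let cord :=
            if ch = '>' then (st.1.1 + 1, st.1.2)
            else if ch = '<' then (st.1.1 - 1, st.1.2)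
            else if ch = '^' then (st.1.1, st.1.2 + 1)
            else if ch = 'v' then (st.1.1, st.1.2 - 1)
            else st.1
          (cord, PySem.Set.add st.2 cord)) _]
  rw [pvA_loop, pvGo_spec]
  show _ = PySem.Set.ofList (((0:Int),(0:Int)) :: pvVisits (0,0) path_string.toList)
  rw [PySem.Set.ofList_eq_foldl, PySem.Set.ofList_eq_foldl]
  rfl

-- ===== VERDICT (by name: the statement is the Claim_ definition above) =====
theorem get_visited_houses_spec : Claim_equal_get_visited_houses := by
  intro s _
  exact pv_main s
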